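-- pv_equiv track=rewrite | github.com/Kaiolohia/Card-Jitsu | main.py | didIWinYet
-- ===== SOURCE A (Python) =====
-- def didIWinYet(bank):
--   Fire = False
--   Water = False
--   Snow = False
--   for x in range(len(bank)):
--     if bank[x][1] == "Fire":
--       Fire = True
--   for x in range(len(bank)):
--     if bank[x][1] == "Water":
--       Water = True
--   for x in range(len(bank)):
--     if bank[x][1] == "Snow":
--       Snow = True
--   if Fire == True and Water == True and Snow == True:
--     return True
-- ===== SOURCE B (Python) =====
-- def didIWinYet(bank):
--   # One pass with early exit: keep a shrinking worklist of still-missing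
--   # card types; return True the moment the worklist empties.
--   needed = ["Fire", "Water", "Snow"]
--   for card in bank:
--     if card[1] in needed:
--       needed.remove(card[1])
--       if not needed:
--         return True
-- ===== Notes on version B (the rewrite author's own statement) =====
-- stated objective: alternative
-- what changed: Replaced A's three full index-based scans with boolean flags by a single pass over the bank that maintains a shrinking worklist of still-missing types and returns True early the moment the worklist empties.
import Mathlib
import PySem

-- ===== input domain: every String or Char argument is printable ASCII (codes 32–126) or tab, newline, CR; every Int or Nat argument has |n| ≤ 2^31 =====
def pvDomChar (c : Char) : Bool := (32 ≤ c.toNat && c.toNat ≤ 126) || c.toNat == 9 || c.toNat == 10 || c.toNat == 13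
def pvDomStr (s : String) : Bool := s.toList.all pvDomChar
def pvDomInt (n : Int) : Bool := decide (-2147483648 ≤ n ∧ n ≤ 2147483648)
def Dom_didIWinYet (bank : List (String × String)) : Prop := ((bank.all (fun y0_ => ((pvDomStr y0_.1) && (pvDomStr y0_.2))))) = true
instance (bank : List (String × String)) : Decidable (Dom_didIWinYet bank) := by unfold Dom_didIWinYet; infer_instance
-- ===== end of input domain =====

-- B replaces A's three full scans with flags by one early-exit pass over the bank
-- maintaining a shrinking worklist of still-missing types (objective: alternative).
-- ===== PORT A =====
-- literal port of A: three for-x-in-range(len(bank)) loops each setting a flag, then the combined test; implicit 'return None' -> none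
def didIWinYet (bank : List (String × String)) : Option Bool :=
  let fire := (PySem.List.pyRange 0 (PySem.List.len bank) 1).foldl
    (fun f x => if (PySem.List.pyGetD bank x ("", "")).2 == "Fire" then true else f) false
  let water := (PySem.List.pyRange 0 (PySem.List.len bank) 1).foldl
    (fun f x => if (PySem.List.pyGetD bank x ("", "")).2 == "Water" then true else f) false
  let snow := (PySem.List.pyRange 0 (PySem.List.len bank) 1).foldl
    (fun f x => if (PySem.List.pyGetD bank x ("", "")).2 == "Snow" then true else f) false
  if fire == true && water == true && snow == true then some true else none

-- ===== PORT B =====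
-- port of Source B's loop: walk the bank once, removing each seen type from the
-- worklist 'needed'; the early 'return True' is the some-true branch, falling
-- off the loop is none. needed.remove(card[1]) is guarded by the membership
-- test, so PySem.List.remove? is always some there (the none branch is dead).
def pvAltGo (needed : List String) : List (String × String) → Option Bool
  | [] => none
  | card :: rest =>
    if needed.contains card.2 then
      match PySem.List.remove? needed card.2 with
      | some needed' => if needed'.isEmpty then some true else pvAltGo needed' rest
      | none => none
    else pvAltGo needed rest

def didIWinYet_alt (bank : List (String × String)) : Option Bool :=
  pvAltGo ["Fire", "Water", "Snow"] bank

-- ===== PRECONDITION & SPEC =====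
def Spec_didIWinYet (bank : List (String × String)) (out : Option Bool) : Prop := out = didIWinYet_alt bank
instance (bank : List (String × String)) (out : Option Bool) : Decidable (Spec_didIWinYet bank out) := by unfold Spec_didIWinYet; infer_instance

-- ===== CLAIM (what is proved, stated in full; the proofs are below) =====
def Claim_equal_didIWinYet : Prop := ∀ (bank : List (String × String)), Dom_didIWinYet bank → Spec_didIWinYet bank (didIWinYet bank)

-- ===== LEMMAS AND PROOFS =====
-- A's flag loop computes 'some second component equals s'
theorem flag_eq_any (bank : List (String × String)) (s : String) :
    (PySem.List.pyRange 0 (PySem.List.len bank) 1).foldl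
      (fun f x => if (PySem.List.pyGetD bank x ("", "")).2 == s then true else f) false
      = bank.any (fun p => p.2 == s) := by
  simp only [PySem.List.len_eq]
  rw [PySem.List.foldl_pyRange_zero_pyGetD' bank ("", "")
        (fun f p => if p.2 == s then true else f) false]
  induction bank with
  | nil => simp
  | cons p l ih =>
    simp only [List.foldl_cons, List.any_cons]
    by_cases h : p.2 == s
    · simp only [h, Bool.true_or]
      clear ih
      induction l with
      | nil => rfl
      | cons q m ih2 => simp only [List.foldl_cons]; split_ifs <;> exact ih2
    · simp only [h, Bool.false_or]
      exact ih

-- B's worklist loop returns some true iff every still-needed type occurs in the rest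
theorem pvAltGo_eq (xs : List (String × String)) :
    ∀ (needed : List String), needed ≠ [] → needed.Nodup →
      pvAltGo needed xs
        = (if ∀ s ∈ needed, s ∈ xs.map Prod.snd then some true else none) := by
  induction xs with
  | nil =>
    intro needed hne _
    obtain ⟨a, t, rfl⟩ := List.exists_cons_of_ne_nil hne
    rw [show pvAltGo (a :: t) [] = none from rfl, if_neg]
    intro h
    simpa using h a List.mem_cons_self
  | cons card rest ih =>
    intro needed hne hnd
    by_cases hmem : card.2 ∈ needed
    · have hrem := PySem.List.remove?_eq_some_erase (v := card.2) (xs := needed) hmem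
      rw [pvAltGo, if_pos (by simpa using hmem), hrem]
      by_cases hemp : (needed.erase card.2).isEmpty
      · simp only [hemp, if_true]
        have hall : ∀ s ∈ needed, s ∈ (card :: rest).map Prod.snd := by
          intro s hs
          have : s = card.2 := by
            by_contra hne'
            have : s ∈ needed.erase card.2 := (hnd.mem_erase_iff).2 ⟨hne', hs⟩
            rw [List.isEmpty_iff.1 hemp] at this
            exact absurd this (List.not_mem_nil)
          simp [this]
        exact (if_pos hall).symm
      · show (if (needed.erase card.2).isEmpty = true then some true
              else pvAltGo (needed.erase card.2) rest)
            = if ∀ s ∈ needed, s ∈ (card :: rest).map Prod.snd then some true else none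
        rw [if_neg hemp]
        rw [ih _ (by simpa [List.isEmpty_iff] using hemp) (hnd.erase _)]
        have hiff : (∀ s ∈ needed.erase card.2, s ∈ rest.map Prod.snd)
            ↔ (∀ s ∈ needed, s ∈ (card :: rest).map Prod.snd) := by
          constructor
          · intro h s hs
            by_cases hsc : s = card.2
            · simp [hsc]
            · exact List.mem_cons_of_mem _ (h s ((hnd.mem_erase_iff).2 ⟨hsc, hs⟩))
          · intro h s hs
            obtain ⟨hsc, hs'⟩ := (hnd.mem_erase_iff).1 hs
            rcases (List.mem_cons).1 (h s hs') with h1 | h1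
            · exact absurd h1 hsc
            · exact h1
        by_cases hc : ∀ s ∈ needed, s ∈ (card :: rest).map Prod.snd
        · rw [if_pos (hiff.2 hc), if_pos hc]
        · rw [if_neg (fun h => hc (hiff.1 h)), if_neg hc]
    · rw [pvAltGo, if_neg (by simpa using hmem), ih _ hne hnd]
      have hiff : (∀ s ∈ needed, s ∈ rest.map Prod.snd)
          ↔ (∀ s ∈ needed, s ∈ (card :: rest).map Prod.snd) := by
        constructor
        · intro h s hs; exact List.mem_cons_of_mem _ (h s hs)
        · intro h s hs
          rcases (List.mem_cons).1 (h s hs) with h1 | h1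
          · exact absurd (h1 ▸ hs) hmem
          · exact h1
      by_cases hc : ∀ s ∈ needed, s ∈ (card :: rest).map Prod.snd
      · rw [if_pos (hiff.2 hc), if_pos hc]
      · rw [if_neg (fun h => hc (hiff.1 h)), if_neg hc]

theorem any_eq_mem_map (bank : List (String × String)) (s : String) :
    bank.any (fun p => p.2 == s) = decide (s ∈ bank.map Prod.snd) := by
  induction bank with
  | nil => simp
  | cons p l ih =>
    by_cases h : p.2 = s
    · simp [h]
    · have h1 : (p.2 == s) = false := by simpa using h
      have h2 : ¬ s = p.2 := fun e => h e.symm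
      simp [List.any_cons, ih, h1, List.mem_cons, h2]

-- ===== VERDICT (by name: the statement is the Claim_ definition above) =====
theorem didIWinYet_spec : Claim_equal_didIWinYet := by
  intro bank _
  unfold Spec_didIWinYet
  have key : didIWinYet_alt bank
      = if "Fire" ∈ bank.map Prod.snd ∧ "Water" ∈ bank.map Prod.snd ∧ "Snow" ∈ bank.map Prod.snd
        then some true else none := by
    rw [didIWinYet_alt, pvAltGo_eq bank ["Fire", "Water", "Snow"] (by simp) (by decide)]
    exact if_congr (by simp) rfl rfl
  rw [key]
  simp only [didIWinYet, flag_eq_any, any_eq_mem_map]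
  by_cases hf : "Fire" ∈ bank.map Prod.snd <;>
    by_cases hw : "Water" ∈ bank.map Prod.snd <;>
      by_cases hs : "Snow" ∈ bank.map Prod.snd <;>
        simp [hf, hw, hs]
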